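-- pv_equiv track=rewrite | github.com/JanaLasser/agent_based_COVID_SEIRX | src/scseirx/construct_school_network.py | get_floor_distribution
-- ===== SOURCE A (Python) =====
-- def get_floor_distribution(N_floors, N_classes):
-- 	"""
-- 	Distribute the number of classes evenly over the number of available floors.
--
-- 	Parameters
-- 	----------
-- 	N_floors : int
-- 		Number of available floors.
-- 	N_classes : int
-- 		Number of classes in the school.
--
--
-- 	Returns
-- 	-------
-- 	floors : dictionary
-- 		Dictionary of the form {floor1:[class_1, class_2, ...], ...}
-- 	floors_inv : dictionary
-- 		Dictionary of the form {class1:floor1, ..., class_N:floor_N}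
-- 	"""
-- 	floors = {i:[] for i in range(N_floors)} # starts with 0 (ground floor)
-- 	classes = list(range(1, N_classes + 1))
-- 	classes_per_floor = int(N_classes / N_floors)
--
-- 	# easiest case: the number of classes is divisible by the number of floors
-- 	if N_classes % N_floors == 0:
-- 		for i, floor in enumerate(range(N_floors)):
-- 			floors[floor] = classes[i * classes_per_floor: \
-- 									i * classes_per_floor + classes_per_floor]
--
-- 	# if there are leftover classes: assign them one-by-one to the existing
-- 	# floors, starting with the lowest
-- 	else:
-- 		leftover_classes = N_classes % N_floors
-- 		classes_per_floor += 1
-- 		for i, floor in enumerate(range(N_floors)):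
-- 			if i < leftover_classes:
-- 				floors[floor] = classes[i * classes_per_floor: \
-- 									  i * classes_per_floor + classes_per_floor]
-- 			# hooray, index magic!
-- 			else:
-- 				floors[floor] = classes[leftover_classes * classes_per_floor + \
-- 						(i - leftover_classes) * (classes_per_floor - 1):
-- 						leftover_classes * (classes_per_floor) + \
-- 						(i - leftover_classes) * (classes_per_floor - 1) + \
-- 						classes_per_floor - 1]
--
-- 	# invert dict for easier use
-- 	floors_inv = {}
-- 	for floor, classes in floors.items():
-- 		for c in classes:
-- 			floors_inv.update({c:floor})
--
-- 	return floors, floors_inv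
-- ===== SOURCE B (Python) =====
-- def get_floor_distribution(N_floors, N_classes):
--     # Class-driven construction: instead of slicing the class list per floor,
--     # compute each class's floor directly by a closed-form formula and group.
--     base, rem = divmod(N_classes, N_floors)
--     cut = rem * (base + 1)          # classes 1..cut live on the "big" floors
--     floors = {f: [] for f in range(N_floors)}
--     floors_inv = {}
--     for c in range(1, N_classes + 1):
--         idx = c - 1
--         f = idx // (base + 1) if idx < cut else rem + (idx - cut) // base
--         floors[f].append(c)
--         floors_inv[c] = f
--     return floors, floors_inv
-- ===== Notes on version B (the rewrite author's own statement) =====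
-- stated objective: alternative
-- what changed: A iterates over floors and slices the class list with branch-dependent closed-form offsets, then inverts the dict in a second pass; B iterates over classes, computes each class's floor directly by a closed-form quotient formula, and groups forward and inverse maps in one pass.
-- outside the precondition, e.g. on get_floor_distribution(-2, 3): A returns ({}, {}), B raises KeyError
import Mathlib
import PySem

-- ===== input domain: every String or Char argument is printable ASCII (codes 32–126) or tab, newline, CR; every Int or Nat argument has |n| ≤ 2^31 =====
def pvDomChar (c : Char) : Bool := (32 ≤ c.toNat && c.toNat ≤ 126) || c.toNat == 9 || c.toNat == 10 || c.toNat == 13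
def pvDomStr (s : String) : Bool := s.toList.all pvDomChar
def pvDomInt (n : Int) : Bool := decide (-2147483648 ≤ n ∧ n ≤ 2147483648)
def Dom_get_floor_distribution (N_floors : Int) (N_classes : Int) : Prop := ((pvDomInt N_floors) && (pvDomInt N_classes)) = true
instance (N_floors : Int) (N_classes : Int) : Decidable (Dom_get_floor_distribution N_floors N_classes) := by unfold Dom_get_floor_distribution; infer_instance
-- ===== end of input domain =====

-- B is class-driven instead of floor-driven: it computes each class's floor by a
-- closed-form quotient formula and groups, building both maps in one pass; same values.

-- ===== PORT A =====
-- `int(N_classes / N_floors)` is float division truncated toward zero; ported as Int.tdiv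
-- (truncating integer division). This is exact on the whole domain |n| ≤ 2^31: the float
-- quotient's rounding error is at most |N_classes|/|N_floors|·2⁻⁵³ ≤ 2⁻²²/|N_floors|,
-- strictly smaller than the gap ≥ 1/|N_floors| from the exact rational quotient to the
-- nearest other integer, so truncation is unaffected.
def get_floor_distribution (N_floors : Int) (N_classes : Int) : (List (Int × List Int)) × (List (Int × Int)) :=
  -- floors = {i:[] for i in range(N_floors)}
  let floors : PySem.Dict Int (List Int) :=
    (PySem.List.pyRange 0 N_floors 1).foldl (fun d i => d.insert i []) PySem.Dict.empty
  -- classes = list(range(1, N_classes + 1))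
  let classes : List Int := PySem.List.pyRange 1 (N_classes + 1) 1
  -- classes_per_floor = int(N_classes / N_floors)
  let classes_per_floor : Int := Int.tdiv N_classes N_floors
  let floors : PySem.Dict Int (List Int) :=
    if PySem.Int.mod N_classes N_floors = 0 then
      -- for i, floor in enumerate(range(N_floors)): floors[floor] = classes[i*cpf : i*cpf+cpf]
      (PySem.List.enumerate (PySem.List.pyRange 0 N_floors 1) 0).foldl
        (fun d p => d.insert p.2
          (PySem.List.slice classes (some (p.1 * classes_per_floor))
            (some (p.1 * classes_per_floor + classes_per_floor)))) floors
    else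
      let leftover_classes := PySem.Int.mod N_classes N_floors
      let classes_per_floor := classes_per_floor + 1
      (PySem.List.enumerate (PySem.List.pyRange 0 N_floors 1) 0).foldl
        (fun d p =>
          if p.1 < leftover_classes then
            d.insert p.2
              (PySem.List.slice classes (some (p.1 * classes_per_floor))
                (some (p.1 * classes_per_floor + classes_per_floor)))
          else
            d.insert p.2
              (PySem.List.slice classes
                (some (leftover_classes * classes_per_floor +
                       (p.1 - leftover_classes) * (classes_per_floor - 1)))
                (some (leftover_classes * classes_per_floor +
                       (p.1 - leftover_classes) * (classes_per_floor - 1) +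
                       classes_per_floor - 1)))) floors
  -- floors_inv = {}; for floor, classes in floors.items(): for c in classes: floors_inv.update({c: floor})
  let floors_inv : PySem.Dict Int Int :=
    floors.items.foldl (fun dinv fc => fc.2.foldl (fun dv c => dv.insert c fc.1) dinv)
      PySem.Dict.empty
  (floors.items, floors_inv.items)

-- ===== PORT B =====
-- `floors[f].append(c)` is ported as Dict.modify f [] (· ++ [c]): exact whenever the key f
-- is present, which Pre_ guarantees (Python raises KeyError otherwise; such inputs are excluded).
def get_floor_distribution_alt (N_floors : Int) (N_classes : Int) : (List (Int × List Int)) × (List (Int × Int)) :=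
  -- base, rem = divmod(N_classes, N_floors)
  let base : Int := PySem.Int.floordiv N_classes N_floors
  let rem : Int := PySem.Int.mod N_classes N_floors
  -- cut = rem * (base + 1)
  let cut : Int := rem * (base + 1)
  let floors0 : PySem.Dict Int (List Int) :=
    (PySem.List.pyRange 0 N_floors 1).foldl (fun d i => d.insert i []) PySem.Dict.empty
  -- for c in range(1, N_classes+1): f = …; floors[f].append(c); floors_inv[c] = f
  let st :=
    (PySem.List.pyRange 1 (N_classes + 1) 1).foldl
      (fun (st : PySem.Dict Int (List Int) × PySem.Dict Int Int) c =>
        (st.1.modify (if c - 1 < cut then PySem.Int.floordiv (c - 1) (base + 1)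
                      else rem + PySem.Int.floordiv (c - 1 - cut) base) [] (· ++ [c]),
         st.2.insert c (if c - 1 < cut then PySem.Int.floordiv (c - 1) (base + 1)
                        else rem + PySem.Int.floordiv (c - 1 - cut) base)))
      (floors0, PySem.Dict.empty)
  (st.1.items, st.2.items)

-- ===== PRECONDITION & SPEC =====
-- Pre_ excludes N_floors = 0, where A raises ZeroDivisionError, and negative N_floors with
-- positive N_classes, where A's empty-dict return is an accident of iterating an empty range
-- while B's per-class floor formula raises KeyError.
def Pre_get_floor_distribution (N_floors : Int) (N_classes : Int) : Prop :=
  0 < N_floors ∨ (N_floors < 0 ∧ N_classes ≤ 0)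
instance (N_floors : Int) (N_classes : Int) : Decidable (Pre_get_floor_distribution N_floors N_classes) := by unfold Pre_get_floor_distribution; infer_instance
def pvWitness_get_floor_distribution : Int × Int := (3, 8)

def Spec_get_floor_distribution (N_floors : Int) (N_classes : Int) (out : (List (Int × List Int)) × (List (Int × Int))) : Prop := out = get_floor_distribution_alt N_floors N_classes
instance (N_floors : Int) (N_classes : Int) (out : (List (Int × List Int)) × (List (Int × Int))) : Decidable (Spec_get_floor_distribution N_floors N_classes out) := by unfold Spec_get_floor_distribution; infer_instance

-- ===== CLAIM (what is proved, stated in full; the proofs are below) =====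
def Claim_equal_get_floor_distribution : Prop := ∀ (N_floors : Int) (N_classes : Int), Dom_get_floor_distribution N_floors N_classes → Pre_get_floor_distribution N_floors N_classes → Spec_get_floor_distribution N_floors N_classes (get_floor_distribution N_floors N_classes)

-- ===== LEMMAS AND PROOFS =====

-- closed-form start offset and size of floor i's chunk (proof-side only)
def pvPos (base rem i : Int) : Int := i * base + min i rem
def pvSize (base rem i : Int) : Int := if i < rem then base + 1 else base
def pvChunk (classes : List Int) (base rem i : Int) : List Int :=
  PySem.List.slice classes (some (pvPos base rem i)) (some (pvPos base rem i + pvSize base rem i))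

-- B's per-class floor formula (proof-side name for the inline expression of the port)
def pvKey (base rem c : Int) : Int :=
  if c - 1 < rem * (base + 1) then PySem.Int.floordiv (c - 1) (base + 1)
  else rem + PySem.Int.floordiv (c - 1 - rem * (base + 1)) base

-- A's chunk for floor i, as one function of i (the branch condition moved inside)
def pvChA (N F i : Int) : List Int :=
  if PySem.Int.mod N F = 0 then
    PySem.List.slice (PySem.List.pyRange 1 (N + 1) 1)
      (some (i * Int.tdiv N F)) (some (i * Int.tdiv N F + Int.tdiv N F))
  else if i < PySem.Int.mod N F then
    PySem.List.slice (PySem.List.pyRange 1 (N + 1) 1)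
      (some (i * (Int.tdiv N F + 1))) (some (i * (Int.tdiv N F + 1) + (Int.tdiv N F + 1)))
  else
    PySem.List.slice (PySem.List.pyRange 1 (N + 1) 1)
      (some (PySem.Int.mod N F * (Int.tdiv N F + 1) +
             (i - PySem.Int.mod N F) * (Int.tdiv N F + 1 - 1)))
      (some (PySem.Int.mod N F * (Int.tdiv N F + 1) +
             (i - PySem.Int.mod N F) * (Int.tdiv N F + 1 - 1) + (Int.tdiv N F + 1) - 1))

-- replacing an absent key's value is the identity on the items list
lemma pv_map_id (k : Int) (v : List Int) (l : List (Int × List Int)) (hl : k ∉ l.map Prod.fst) :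
    l.map (fun p => if (p.1 == k) = true then (k, v) else p) = l := by
  induction l with
  | nil => rfl
  | cons a t ih =>
    simp only [List.map_cons, List.mem_cons] at hl ⊢
    have ha : (a.1 == k) = false := by
      simp only [beq_eq_false_iff_ne]; intro he; exact hl (by simp [← he])
    rw [ha]
    simp only [Bool.false_eq_true, if_false]
    rw [ih (by intro hm; exact hl (by simp [List.mem_map] at hm ⊢; exact Or.inr hm))]

-- inserting a key not yet present appends
lemma pv_insert_fresh (xs : List (Int × List Int)) (k : Int) (v : List Int)
    (h : k ∉ xs.map Prod.fst) :
    (PySem.Dict.mk xs).insert k v = PySem.Dict.mk (xs ++ [(k, v)]) := by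
  have hc : (PySem.Dict.mk xs).contains k = false := by
    simp only [PySem.Dict.contains, List.any_eq_false]
    intro p hp
    simp only [beq_iff_eq]
    intro he; exact h (List.mem_map.mpr ⟨p, hp, he⟩)
  simp [PySem.Dict.insert, hc]

-- inserting an existing key of a key-nodup items list overwrites it in place
lemma pv_insert_overwrite (pre suf : List (Int × List Int)) (k : Int) (v w : List Int)
    (hpre : k ∉ pre.map Prod.fst) (hsuf : k ∉ suf.map Prod.fst) :
    (PySem.Dict.mk (pre ++ (k, w) :: suf)).insert k v = PySem.Dict.mk (pre ++ (k, v) :: suf) := by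
  have hc : (PySem.Dict.mk (pre ++ (k, w) :: suf)).contains k = true := by
    simp [PySem.Dict.contains]
  simp only [PySem.Dict.insert, hc, if_true]
  congr 1
  rw [List.map_append, List.map_cons, pv_map_id k v pre hpre, pv_map_id k v suf hsuf]
  simp

-- folding fresh inserts appends the mapped pairs
lemma pv_fold_fresh (l : List Int) (f : Int → List Int) :
    ∀ (pre : List (Int × List Int)), (∀ i ∈ l, i ∉ pre.map Prod.fst) → l.Nodup →
    l.foldl (fun d i => d.insert i (f i)) (PySem.Dict.mk pre)
      = PySem.Dict.mk (pre ++ l.map (fun i => (i, f i))) := by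
  induction l with
  | nil => intro pre _ _; simp
  | cons a t ih =>
    intro pre hdisj hnd
    simp only [List.foldl_cons]
    rw [pv_insert_fresh pre a (f a) (hdisj a (by simp))]
    rw [ih (pre ++ [(a, f a)])
      (by intro i hi
          simp only [List.map_append, List.mem_append, List.map_cons] at *
          rintro (h1 | h2)
          · exact hdisj i (by simp [hi]) h1
          · simp at h2; subst h2; exact (List.nodup_cons.mp hnd).1 hi)
      (List.nodup_cons.mp hnd).2]
    simp

-- folding overwriting inserts over the key list itself rewrites every value
lemma pv_fold_overwrite (l : List Int) (g f : Int → List Int) :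
    ∀ (pre : List (Int × List Int)), (∀ i ∈ l, i ∉ pre.map Prod.fst) → l.Nodup →
    l.foldl (fun d i => d.insert i (f i)) (PySem.Dict.mk (pre ++ l.map (fun i => (i, g i))))
      = PySem.Dict.mk (pre ++ l.map (fun i => (i, f i))) := by
  induction l with
  | nil => intro pre _ _; simp
  | cons a t ih =>
    intro pre hdisj hnd
    have hna : a ∉ t := (List.nodup_cons.mp hnd).1
    have hnt : t.Nodup := (List.nodup_cons.mp hnd).2
    simp only [List.map_cons, List.foldl_cons]
    rw [pv_insert_overwrite pre (t.map fun i => (i, g i)) a (f a) (g a)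
      (hdisj a (by simp))
      (by simp only [List.map_map, List.mem_map]
          rintro ⟨i, hi, he⟩
          simp at he; exact hna (he ▸ hi))]
    have hre : pre ++ (a, f a) :: t.map (fun i => (i, g i))
        = (pre ++ [(a, f a)]) ++ t.map (fun i => (i, g i)) := by simp
    rw [hre, ih (pre ++ [(a, f a)])
      (by intro i hi
          simp only [List.map_append, List.mem_append, List.map_cons] at *
          rintro (h1 | h2)
          · exact hdisj i (by simp [hi]) h1
          · simp at h2; subst h2; exact hna hi)
      hnt]
    simp

lemma pv_fold_overwrite' (l : List Int) (g f : Int → List Int) (hl : l.Nodup) :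
    l.foldl (fun d i => d.insert i (f i)) (PySem.Dict.mk (l.map (fun i => (i, g i))))
      = PySem.Dict.mk (l.map (fun i => (i, f i))) := by
  have h := pv_fold_overwrite l g f [] (by simp) hl
  simpa using h

lemma pv_enumerate_range (F : Int) :
    PySem.List.enumerate (PySem.List.pyRange 0 F 1) 0
      = (PySem.List.pyRange 0 F 1).map (fun i => (i, i)) := by
  apply List.ext_getElem
  · simp [PySem.List.length_enumerate]
  · intro k h1 h2
    rw [PySem.List.getElem_enumerate]
    simp [PySem.List.getElem_pyRange_one]

-- the init dict {i:[] for i in range(F)}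
lemma pv_init_items (F : Int) :
    (PySem.List.pyRange 0 F 1).foldl (fun d i => d.insert i ([] : List Int)) PySem.Dict.empty
      = PySem.Dict.mk ((PySem.List.pyRange 0 F 1).map (fun i => (i, ([] : List Int)))) := by
  have h := pv_fold_fresh (PySem.List.pyRange 0 F 1) (fun _ => []) [] (by simp)
    (PySem.List.nodup_pyRange_one 0 F)
  simpa [PySem.Dict.empty] using h

lemma pv_pos_step (base rem j : Int) :
    pvPos base rem j + (if j < rem then base + 1 else base) = pvPos base rem (j + 1) := by
  unfold pvPos; split_ifs with h <;> rw [add_mul] <;> omega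

-- A's chunk for floor i equals the closed-form chunk (0 ≤ i, 0 < F)
lemma pv_chunkA_eq (N F i : Int) (hF : 0 < F) (hi : 0 ≤ i) :
    pvChA N F i
    = pvChunk (PySem.List.pyRange 1 (N + 1) 1) (PySem.Int.floordiv N F) (PySem.Int.mod N F) i := by
  have hr0 : 0 ≤ PySem.Int.mod N F := PySem.Int.mod_nonneg N hF
  have hrF : PySem.Int.mod N F < F := PySem.Int.mod_lt N hF
  by_cases hN : N ≤ 0
  · have hnil : PySem.List.pyRange 1 (N + 1) 1 = [] := PySem.List.pyRange_one_eq_nil (by omega)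
    unfold pvChA pvChunk
    rw [hnil]
    split_ifs <;> simp [PySem.List.slice]
  · have htd : Int.tdiv N F = PySem.Int.floordiv N F := by
      rw [Int.tdiv_eq_ediv_of_nonneg (by omega), PySem.Int.floordiv_eq_ediv_of_pos hF]
    unfold pvChA pvChunk pvPos pvSize
    rw [htd]
    have hmm := PySem.Int.floordiv_mul_add_mod N F
    split_ifs <;> (congr 2 <;> (ring_nf; omega))

-- A's result in canonical form
lemma pv_A_eq (F N : Int) :
    get_floor_distribution F N
    = (((PySem.List.pyRange 0 F 1).map (fun i => (i, pvChA N F i))),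
       ((PySem.List.pyRange 0 F 1).foldl
          (fun inv i => (pvChA N F i).foldl (fun dv c => dv.insert c i) inv)
          PySem.Dict.empty).items) := by
  simp only [get_floor_distribution]
  rw [pv_enumerate_range, pv_init_items]
  by_cases hmod : PySem.Int.mod N F = 0
  · rw [if_pos hmod]
    rw [List.foldl_map]
    have hbody : ∀ (i : Int),
        PySem.List.slice (PySem.List.pyRange 1 (N + 1) 1)
          (some (i * Int.tdiv N F)) (some (i * Int.tdiv N F + Int.tdiv N F))
        = pvChA N F i := by
      intro i; unfold pvChA; rw [if_pos hmod]
    simp only [hbody]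
    rw [pv_fold_overwrite' (PySem.List.pyRange 0 F 1) (fun _ => []) (fun i => pvChA N F i)
      (PySem.List.nodup_pyRange_one 0 F)]
    simp only [List.foldl_map]
  · rw [if_neg hmod]
    rw [List.foldl_map]
    have hbody : ∀ (d : PySem.Dict Int (List Int)) (i : Int),
        (if i < PySem.Int.mod N F then
          d.insert i
            (PySem.List.slice (PySem.List.pyRange 1 (N + 1) 1)
              (some (i * (Int.tdiv N F + 1))) (some (i * (Int.tdiv N F + 1) + (Int.tdiv N F + 1))))
        else
          d.insert i
            (PySem.List.slice (PySem.List.pyRange 1 (N + 1) 1)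
              (some (PySem.Int.mod N F * (Int.tdiv N F + 1) +
                     (i - PySem.Int.mod N F) * (Int.tdiv N F + 1 - 1)))
              (some (PySem.Int.mod N F * (Int.tdiv N F + 1) +
                     (i - PySem.Int.mod N F) * (Int.tdiv N F + 1 - 1) + (Int.tdiv N F + 1) - 1))))
        = d.insert i (pvChA N F i) := by
      intro d i; unfold pvChA; rw [if_neg hmod]; split_ifs <;> rfl
    simp only [hbody]
    rw [pv_fold_overwrite' (PySem.List.pyRange 0 F 1) (fun _ => []) (fun i => pvChA N F i)
      (PySem.List.nodup_pyRange_one 0 F)]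
    simp only [List.foldl_map]

-- updating a set with elements it already has is the identity
lemma pv_set_update_self (l : List Int) :
    ∀ (s : PySem.Set Int), (∀ x ∈ l, x ∈ s) → PySem.Set.update s l = s := by
  induction l with
  | nil => intro s _; rfl
  | cons a t ih =>
    intro s h
    have ha : PySem.Set.add s a = s := by
      simp [PySem.Set.add, PySem.Set.contains, h a (by simp)]
    show PySem.Set.update (PySem.Set.add s a) t = s
    rw [ha]
    exact ih s (fun x hx => h x (by simp [hx]))

-- getD on the all-empty init dict is []
lemma pv_getD_init (l : List Int) (x : Int) :
    (PySem.Dict.mk (l.map (fun i => (i, ([] : List Int))))).getD x [] = [] := by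
  induction l with
  | nil => rfl
  | cons a t ih =>
    rw [PySem.Dict.getD_eq_get?_getD] at ih ⊢
    simp only [List.map_cons, PySem.Dict.get?_mk_cons]
    split_ifs <;> simp_all

-- flatMap of an indicator selection over a nodup list containing i
lemma pv_flatMap_if (l : List Int) (i : Int) (v : List Int) (hi : i ∈ l) (hnd : l.Nodup) :
    l.flatMap (fun j => if j = i then v else []) = v := by
  induction l with
  | nil => simp at hi
  | cons a t ih =>
    by_cases hai : a = i
    · subst hai
      simp only [List.flatMap_cons]
      have ht : t.flatMap (fun j => if j = a then v else []) = [] :=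
        List.flatMap_eq_nil_iff.mpr (fun j hj => by
          rw [if_neg]
          intro he
          exact (List.nodup_cons.mp hnd).1 (he ▸ hj))
      simp [ht]
    · have h : i ∈ t := by
        rcases List.mem_cons.mp hi with h | h
        · exact absurd h.symm hai
        · exact h
      simp only [List.flatMap_cons, if_neg hai]
      simp [ih h (List.nodup_cons.mp hnd).2]

-- a length-s slice at offset a of range(1, N+1) is the range a+1 .. a+s
lemma pv_slice_range (N a s : Int) (ha : 0 ≤ a) (hs : 0 ≤ s) (hend : a + s ≤ N) :
    PySem.List.slice (PySem.List.pyRange 1 (N + 1) 1) (some a) (some (a + s))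
    = PySem.List.pyRange (a + 1) (a + s + 1) 1 := by
  rw [PySem.List.slice_toNat _ ha (by omega)]
  have hsplit : PySem.List.pyRange 1 (N + 1) 1
      = PySem.List.pyRange 1 (1 + a) 1 ++ (PySem.List.pyRange (1 + a) (1 + a + s) 1
        ++ PySem.List.pyRange (1 + a + s) (N + 1) 1) := by
    rw [← PySem.List.pyRange_one_append (1 + a) (1 + a + s) (N + 1) (by omega) (by omega)]
    rw [← PySem.List.pyRange_one_append 1 (1 + a) (N + 1) (by omega) (by omega)]
  rw [hsplit]
  have hlen1 : (PySem.List.pyRange 1 (1 + a) 1).length = a.toNat := by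
    rw [PySem.List.length_pyRange_one]; omega
  have hlen2 : (PySem.List.pyRange (1 + a) (1 + a + s) 1).length = (a + s).toNat - a.toNat := by
    rw [PySem.List.length_pyRange_one]; omega
  rw [← hlen2, ← hlen1, List.drop_left, List.take_left]
  congr 1 <;> omega

-- chunk i is the literal range pos i + 1 .. pos i + size i  (generic b, r)
lemma pv_chunk_eq_range (N b r F i : Int) (_hF : 0 < F) (hb0 : 0 ≤ b) (hr0 : 0 ≤ r)
    (_hrF : r < F) (hmm : b * F + r = N) (hi0 : 0 ≤ i) (hiF : i < F) :
    pvChunk (PySem.List.pyRange 1 (N + 1) 1) b r i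
    = PySem.List.pyRange (pvPos b r i + 1) (pvPos b r i + pvSize b r i + 1) 1 := by
  have ha0 : 0 ≤ pvPos b r i := by
    have : 0 ≤ i * b := mul_nonneg hi0 hb0
    unfold pvPos; omega
  have hs0 : 0 ≤ pvSize b r i := by unfold pvSize; split_ifs <;> omega
  have hstep : pvPos b r i + pvSize b r i = pvPos b r (i + 1) := by
    unfold pvSize; exact pv_pos_step b r i
  have hend : pvPos b r i + pvSize b r i ≤ N := by
    have h1 : (i + 1) * b ≤ F * b := mul_le_mul_of_nonneg_right (by omega) hb0
    have h2 : F * b = b * F := mul_comm F b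
    rw [hstep]; unfold pvPos; omega
  unfold pvChunk
  exact pv_slice_range N _ _ ha0 hs0 hend

-- the class list is the concatenation of the floors' chunks (generic b, r)
lemma pv_classes_flatMap (N b r F : Int) (hF : 0 < F) (hb0 : 0 ≤ b) (hr0 : 0 ≤ r)
    (hrF : r < F) (hmm : b * F + r = N) :
    PySem.List.pyRange 1 (N + 1) 1
    = (PySem.List.pyRange 0 F 1).flatMap (pvChunk (PySem.List.pyRange 1 (N + 1) 1) b r) := by
  by_cases hN : N ≤ 0
  · have hnil : PySem.List.pyRange 1 (N + 1) 1 = [] := PySem.List.pyRange_one_eq_nil (by omega)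
    rw [hnil]
    symm
    apply List.flatMap_eq_nil_iff.mpr
    intro i _
    simp [pvChunk, PySem.List.slice]
  · have hposF : pvPos b r F = N := by unfold pvPos; rw [mul_comm]; omega
    have hpos0 : pvPos b r 0 = 0 := by unfold pvPos; omega
    have hmono : ∀ j : Int, 0 ≤ j → j < F → pvPos b r j + pvSize b r j ≤ pvPos b r F := by
      intro j hj0 hjF
      have hstep : pvPos b r j + pvSize b r j = pvPos b r (j + 1) := by
        unfold pvSize; exact pv_pos_step b r j
      have h1 : (j + 1) * b ≤ F * b := mul_le_mul_of_nonneg_right (by omega) hb0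
      have h2 : F * b = b * F := mul_comm F b
      rw [hstep]; unfold pvPos; omega
    have haux : ∀ (n : Nat) (j : Int), (F - j).toNat = n → 0 ≤ j → j ≤ F →
        (PySem.List.pyRange j F 1).flatMap (pvChunk (PySem.List.pyRange 1 (N + 1) 1) b r)
        = PySem.List.pyRange (pvPos b r j + 1) (pvPos b r F + 1) 1 := by
      intro n
      induction n with
      | zero =>
        intro j h _ hj
        have hje : j = F := by omega
        subst hje
        rw [PySem.List.pyRange_one_eq_nil le_rfl]
        simp [PySem.List.pyRange_one_eq_nil (le_refl (pvPos b r j + 1))]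
      | succ m ih =>
        intro j h hj0 hjF
        have hjF' : j < F := by omega
        have hsz : 0 ≤ pvSize b r j := by unfold pvSize; split_ifs <;> omega
        rw [PySem.List.pyRange_one_cons hjF']
        simp only [List.flatMap_cons]
        rw [ih (j + 1) (by omega) (by omega) (by omega)]
        rw [pv_chunk_eq_range N b r F j hF hb0 hr0 hrF hmm hj0 hjF']
        have hstep : pvPos b r j + pvSize b r j = pvPos b r (j + 1) := by
          unfold pvSize; exact pv_pos_step b r j
        rw [← hstep]
        rw [← PySem.List.pyRange_one_append (pvPos b r j + 1)
          (pvPos b r j + pvSize b r j + 1) (pvPos b r F + 1)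
          (by omega) (by have := hmono j hj0 hjF'; omega)]
    have h0 := haux (F - 0).toNat 0 rfl le_rfl (le_of_lt hF)
    rw [hpos0, hposF] at h0
    simpa using h0.symm

-- every class of chunk i gets floor i from B's formula  (generic b, r)
lemma pv_key_chunk (N b r F i c : Int) (hF : 0 < F) (hb0 : 0 ≤ b) (hr0 : 0 ≤ r)
    (hrF : r < F) (hmm : b * F + r = N) (hi0 : 0 ≤ i) (hiF : i < F)
    (hc : c ∈ pvChunk (PySem.List.pyRange 1 (N + 1) 1) b r i) :
    pvKey b r c = i := by
  have hN : 1 ≤ N := by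
    by_contra hn
    have hnil : PySem.List.pyRange 1 (N + 1) 1 = [] := PySem.List.pyRange_one_eq_nil (by omega)
    simp [pvChunk, hnil, PySem.List.slice] at hc
  rw [pv_chunk_eq_range N b r F i hF hb0 hr0 hrF hmm hi0 hiF] at hc
  rw [PySem.List.mem_pyRange_one] at hc
  unfold pvKey
  by_cases hir : i < r
  · have hpos : pvPos b r i = i * (b + 1) := by unfold pvPos; ring_nf; omega
    have hsz : pvSize b r i = b + 1 := by unfold pvSize; rw [if_pos hir]
    rw [hpos, hsz] at hc
    have hcut : (i + 1) * (b + 1) ≤ r * (b + 1) :=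
      mul_le_mul_of_nonneg_right (by omega) (by omega)
    rw [if_pos (by nlinarith)]
    rw [PySem.Int.floordiv_eq_iff_of_pos (by omega)]
    constructor <;> nlinarith
  · have hpos : pvPos b r i = i * b + r := by unfold pvPos; omega
    have hsz : pvSize b r i = b := by unfold pvSize; rw [if_neg hir]
    rw [hpos, hsz] at hc
    have hb1 : 1 ≤ b := by nlinarith
    have hge : r * (b + 1) ≤ i * b + r := by nlinarith
    rw [if_neg (by omega)]
    have hdv : PySem.Int.floordiv (c - 1 - r * (b + 1)) b = i - r := by
      rw [PySem.Int.floordiv_eq_iff_of_pos (by omega)]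
      constructor <;> nlinarith
    omega

-- filtering the class list by B's floor formula yields chunk i  (generic b, r)
lemma pv_filter_key (N b r F i : Int) (hF : 0 < F) (hb0 : 0 ≤ b) (hr0 : 0 ≤ r)
    (hrF : r < F) (hmm : b * F + r = N) (hi0 : 0 ≤ i) (hiF : i < F) :
    (PySem.List.pyRange 1 (N + 1) 1).filter (fun c => pvKey b r c == i)
    = pvChunk (PySem.List.pyRange 1 (N + 1) 1) b r i := by
  conv_lhs => rw [pv_classes_flatMap N b r F hF hb0 hr0 hrF hmm]
  rw [List.filter_flatMap]
  have hpt : ∀ j ∈ PySem.List.pyRange 0 F 1,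
      (fun j => (pvChunk (PySem.List.pyRange 1 (N + 1) 1) b r j).filter
        (fun c => pvKey b r c == i)) j
      = (fun j => if j = i then pvChunk (PySem.List.pyRange 1 (N + 1) 1) b r i else []) j := by
    intro j hj
    have hjb := PySem.List.mem_pyRange_one.mp hj
    by_cases hji : j = i
    · subst hji
      beta_reduce
      rw [if_pos rfl]
      apply List.filter_eq_self.mpr
      intro c hc
      simp [pv_key_chunk N b r F j c hF hb0 hr0 hrF hmm hjb.1 hjb.2 hc]
    · beta_reduce
      rw [if_neg hji]
      apply List.filter_eq_nil_iff.mpr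
      intro c hc
      simp [pv_key_chunk N b r F j c hF hb0 hr0 hrF hmm hjb.1 hjb.2 hc, hji]
  rw [List.flatMap_def, List.map_congr_left hpt, ← List.flatMap_def]
  exact pv_flatMap_if _ i _ (PySem.List.mem_pyRange_one.mpr ⟨hi0, hiF⟩)
    (PySem.List.nodup_pyRange_one 0 F)

-- every class's computed floor lies in range(F)  (generic b, r)
lemma pv_key_mem (N b r F c : Int) (hF : 0 < F) (hb0 : 0 ≤ b) (hr0 : 0 ≤ r)
    (hrF : r < F) (hmm : b * F + r = N) (hc : c ∈ PySem.List.pyRange 1 (N + 1) 1) :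
    pvKey b r c ∈ PySem.List.pyRange 0 F 1 := by
  rw [pv_classes_flatMap N b r F hF hb0 hr0 hrF hmm] at hc
  rcases List.mem_flatMap.mp hc with ⟨i, hi, hci⟩
  have hib := PySem.List.mem_pyRange_one.mp hi
  rw [pv_key_chunk N b r F i c hF hb0 hr0 hrF hmm hib.1 hib.2 hci]
  exact hi

-- B's result in canonical form (0 < F)
lemma pv_B_eq (F N : Int) (hF : 0 < F) :
    get_floor_distribution_alt F N
    = (((PySem.List.pyRange 0 F 1).map (fun i => (i, pvChA N F i))),
       ((PySem.List.pyRange 0 F 1).foldl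
          (fun inv i => (pvChA N F i).foldl (fun dv c => dv.insert c i) inv)
          PySem.Dict.empty).items) := by
  have hr0 : 0 ≤ PySem.Int.mod N F := PySem.Int.mod_nonneg N hF
  have hrF : PySem.Int.mod N F < F := PySem.Int.mod_lt N hF
  have hmm : PySem.Int.floordiv N F * F + PySem.Int.mod N F = N :=
    PySem.Int.floordiv_mul_add_mod N F
  by_cases hN : N ≤ 0
  -- no classes at all: both sides are the all-empty tables
  · have hnilN : PySem.List.pyRange 1 (N + 1) 1 = [] := PySem.List.pyRange_one_eq_nil (by omega)
    have hChA : ∀ i : Int, pvChA N F i = [] := by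
      intro i
      unfold pvChA
      rw [hnilN]
      split_ifs <;> simp [PySem.List.slice]
    simp only [get_floor_distribution_alt, hnilN, List.foldl_nil]
    rw [pv_init_items F]
    rw [Prod.mk.injEq]
    constructor
    · show List.map _ _ = _
      exact List.map_congr_left (fun i _ => by rw [hChA i])
    · congr 1
      have hbody : ∀ (inv : PySem.Dict Int Int) (i : Int), i ∈ PySem.List.pyRange 0 F 1 →
          (fun inv i => (pvChA N F i).foldl (fun dv c => dv.insert c i) inv) inv i
          = (fun (inv : PySem.Dict Int Int) (_ : Int) => inv) inv i := by
        intro inv i _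
        simp [hChA i]
      rw [PySem.List.foldl_congr_mem _ _ _ _ hbody, List.foldl_fixed]
  -- at least one class
  · have hb0 : 0 ≤ PySem.Int.floordiv N F := by
      by_contra hlt
      have h1 : PySem.Int.floordiv N F ≤ -1 := by omega
      have h2 : PySem.Int.floordiv N F * F ≤ -1 * F := mul_le_mul_of_nonneg_right h1 (by omega)
      omega
    simp only [get_floor_distribution_alt]
    have hkey : ∀ c : Int,
        (if c - 1 < PySem.Int.mod N F * (PySem.Int.floordiv N F + 1)
         then PySem.Int.floordiv (c - 1) (PySem.Int.floordiv N F + 1)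
         else PySem.Int.mod N F +
           PySem.Int.floordiv (c - 1 - PySem.Int.mod N F * (PySem.Int.floordiv N F + 1))
             (PySem.Int.floordiv N F))
        = pvKey (PySem.Int.floordiv N F) (PySem.Int.mod N F) c := fun c => rfl
    simp only [hkey]
    rw [PySem.List.foldl_prod_mk
      (fun (d : PySem.Dict Int (List Int)) (c : Int) =>
        d.modify (pvKey (PySem.Int.floordiv N F) (PySem.Int.mod N F) c) [] (fun l => l ++ [c]))
      (fun (d : PySem.Dict Int Int) (c : Int) =>
        d.insert c (pvKey (PySem.Int.floordiv N F) (PySem.Int.mod N F) c))]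
    rw [pv_init_items F]
    simp only []
    rw [Prod.mk.injEq]
    constructor
    -- forward map
    · have hkeys0 : (PySem.Dict.mk ((PySem.List.pyRange 0 F 1).map
          (fun i => (i, ([] : List Int))))).keys = PySem.List.pyRange 0 F 1 := by
        simp [PySem.Dict.keys, List.map_map, Function.comp_def]
      have hkeys : ((PySem.List.pyRange 1 (N + 1) 1).foldl
          (fun d c => d.modify (pvKey (PySem.Int.floordiv N F) (PySem.Int.mod N F) c) []
            (fun l => l ++ [c]))
          (PySem.Dict.mk ((PySem.List.pyRange 0 F 1).map (fun i => (i, ([] : List Int)))))).keys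
          = PySem.List.pyRange 0 F 1 := by
        rw [PySem.Dict.keys_foldl_modify_key (PySem.List.pyRange 1 (N + 1) 1)
          (pvKey (PySem.Int.floordiv N F) (PySem.Int.mod N F)) [] (fun _ c => fun l => l ++ [c])]
        rw [hkeys0]
        apply pv_set_update_self
        intro x hx
        rcases List.mem_map.mp hx with ⟨c, hc, he⟩
        exact he ▸ pv_key_mem N _ _ F c hF hb0 hr0 hrF hmm hc
      have hnd : ((PySem.List.pyRange 1 (N + 1) 1).foldl
          (fun d c => d.modify (pvKey (PySem.Int.floordiv N F) (PySem.Int.mod N F) c) []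
            (fun l => l ++ [c]))
          (PySem.Dict.mk ((PySem.List.pyRange 0 F 1).map (fun i => (i, ([] : List Int)))))).keys.Nodup := by
        rw [hkeys]; exact PySem.List.nodup_pyRange_one 0 F
      rw [PySem.Dict.items_eq_map_keys _ hnd []]
      rw [hkeys]
      apply List.map_congr_left
      intro i hi
      have hib := PySem.List.mem_pyRange_one.mp hi
      have hfold : (PySem.List.pyRange 1 (N + 1) 1).foldl
          (fun d c => d.modify (pvKey (PySem.Int.floordiv N F) (PySem.Int.mod N F) c) []
            (fun l => l ++ [c]))
          (PySem.Dict.mk ((PySem.List.pyRange 0 F 1).map (fun i => (i, ([] : List Int)))))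
          = (((PySem.List.pyRange 1 (N + 1) 1).map
              (fun c => (pvKey (PySem.Int.floordiv N F) (PySem.Int.mod N F) c, c))).foldl
              (fun d p => d.modify p.1 [] (fun l => l ++ [p.2]))
              (PySem.Dict.mk ((PySem.List.pyRange 0 F 1).map (fun i => (i, ([] : List Int)))))) := by
        rw [List.foldl_map]
      rw [hfold, PySem.Dict.getD_foldl_modify_append]
      rw [pv_getD_init]
      rw [List.filter_map]
      have hcomp : ((fun p => p.1 == i) ∘ fun c =>
          (pvKey (PySem.Int.floordiv N F) (PySem.Int.mod N F) c, c))
          = fun c => pvKey (PySem.Int.floordiv N F) (PySem.Int.mod N F) c == i := rfl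
      rw [hcomp, List.map_map]
      have hsnd : ((fun x => x.2) ∘ fun c =>
          (pvKey (PySem.Int.floordiv N F) (PySem.Int.mod N F) c, c)) = id := rfl
      rw [hsnd, List.map_id]
      rw [pv_filter_key N _ _ F i hF hb0 hr0 hrF hmm hib.1 hib.2]
      rw [pv_chunkA_eq N F i hF hib.1]
      simp
    -- inverse map
    · congr 1
      conv_lhs =>
        rw [pv_classes_flatMap N (PySem.Int.floordiv N F) (PySem.Int.mod N F) F hF hb0 hr0 hrF hmm]
      rw [List.foldl_flatMap]
      apply PySem.List.foldl_congr_mem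
      intro acc i hi
      have hib := PySem.List.mem_pyRange_one.mp hi
      rw [pv_chunkA_eq N F i hF hib.1]
      apply PySem.List.foldl_congr_mem
      intro acc2 c hc
      rw [pv_key_chunk N _ _ F i c hF hb0 hr0 hrF hmm hib.1 hib.2 hc]

-- ===== VERDICT (by name: the statement is the Claim_ definition above) =====
theorem get_floor_distribution_spec : Claim_equal_get_floor_distribution := by
  intro F N _ hpre
  unfold Spec_get_floor_distribution
  rcases hpre with hF | ⟨hFneg, hN⟩
  · rw [pv_A_eq F N, pv_B_eq F N hF]
  · have hnilF : PySem.List.pyRange 0 F 1 = [] := PySem.List.pyRange_one_eq_nil (by omega)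
    have hnilN : PySem.List.pyRange 1 (N + 1) 1 = [] := PySem.List.pyRange_one_eq_nil (by omega)
    simp only [get_floor_distribution, get_floor_distribution_alt, hnilF, hnilN]
    simp [PySem.List.enumerate_nil, PySem.Dict.empty]
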